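-- pv_equiv track=rewrite | github.com/kvarun95/cshg | Curvelab/fdct3d/src/setup.py | remove_pthread
-- ===== SOURCE A (Python) =====
-- def remove_pthread(x):
--     if type(x) is str:
--         # x.replace(" -pthread ") would be probably enough...
--         # but we want to make sure we make it right for every input
--         if x=="-pthread":
--             return ""
--         if x.startswith("-pthread "):
--             return remove_pthread(x[len("-pthread "):])
--         if x.endswith(" -pthread"):
--             return remove_pthread(x[:-len(" -pthread")])
--         return x.replace(" -pthread ", " ")
--     return x
-- ===== SOURCE B (Python) =====
-- def remove_pthread(x):
--     if type(x) is not str: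
--         return x
--     # Two-pointer scan over the original string: maintain window [i, j) instead of
--     # building intermediate strings, then emit the window with a manual
--     # left-to-right non-overlapping replace of " -pthread " by " ".
--     i, j = 0, len(x)
--     while True:
--         n = j - i
--         if n == 8 and x[i:j] == "-pthread":
--             return ""
--         if n >= 9 and x[i:i + 9] == "-pthread ":
--             i += 9
--         elif n >= 9 and x[j - 9:j] == " -pthread":
--             j -= 9
--         else:
--             break
--     out = []
--     k = i
--     while k < j:
--         if k + 10 <= j and x[k:k + 10] == " -pthread ":
--             out.append(" ")
--             k += 10
--         else:
--             out.append(x[k])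
--             k += 1
--     return "".join(out)
-- ===== Notes on version B (the rewrite author's own statement) =====
-- stated objective: alternative
-- what changed: Replaces A's recursion on freshly-sliced strings and the library str.replace with a two-pointer window [i,j) over the original string plus a manual single-pass non-overlapping replace that emits the output directly.
import Mathlib
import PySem

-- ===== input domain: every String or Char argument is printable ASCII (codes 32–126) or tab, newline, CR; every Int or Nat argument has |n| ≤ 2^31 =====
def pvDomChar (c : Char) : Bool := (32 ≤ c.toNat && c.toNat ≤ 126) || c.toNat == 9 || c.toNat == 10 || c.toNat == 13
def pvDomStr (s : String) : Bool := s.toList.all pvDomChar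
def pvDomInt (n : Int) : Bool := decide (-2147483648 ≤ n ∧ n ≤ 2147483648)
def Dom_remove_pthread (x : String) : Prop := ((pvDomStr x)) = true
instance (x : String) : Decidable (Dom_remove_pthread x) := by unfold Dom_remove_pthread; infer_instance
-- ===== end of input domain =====

-- B replaces A's recursion on sliced strings by a two-pointer window over the original
-- string plus a manual single-pass replace (objective: alternative; return value only).

-- "-pthread", "-pthread ", " -pthread", " -pthread " as char lists
def patP : List Char := ['-','p','t','h','r','e','a','d']
def patPfx : List Char := ['-','p','t','h','r','e','a','d',' ']
def patSfx : List Char := [' ','-','p','t','h','r','e','a','d']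
def patMid : List Char := [' ','-','p','t','h','r','e','a','d',' ']

-- ===== PORT A =====
-- literal port of A's recursion (the `type(x) is str` guard is vacuous: x : String)
def removeA (s : List Char) : List Char :=
  if s = patP then []
  else if PySem.Chars.startswith s patPfx then
    removeA (PySem.Chars.slice s (some 9) none)           -- x[len("-pthread "):]
  else if PySem.Chars.endswith s patSfx then
    removeA (PySem.Chars.slice s none (some (-9)))        -- x[:-len(" -pthread")]
  else PySem.Chars.replace s patMid [' ']                 -- x.replace(" -pthread ", " ")
termination_by s.length
decreasing_by
  · have h9 : 9 ≤ s.length := by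
      have := List.IsPrefix.length_le (List.isPrefixOf_iff_prefix.mp (by assumption))
      simpa [patPfx] using this
    simp only [PySem.Chars.slice_eq_listSlice]
    rw [show ((9 : Int)) = ((9 : Nat) : Int) by norm_num, PySem.List.slice_from_natCast]
    simp [List.length_drop]; omega
  · have h9 : 9 ≤ s.length := by
      have := List.IsSuffix.length_le (List.isSuffixOf_iff_suffix.mp (by assumption))
      simpa [patSfx] using this
    simp only [PySem.Chars.slice_eq_listSlice]
    rw [PySem.List.slice_to_neg_ofNat s 9 (by omega)]
    simp [List.length_take]; omega

def remove_pthread (x : String) : String := String.ofList (removeA x.toList)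

-- ===== PORT B =====
-- the emit loop: manual left-to-right non-overlapping replace of " -pthread " by " " on x[i:j)
def emitB (s : List Char) (j k : Nat) : List Char :=
  if k < j then
    if k + 10 ≤ j ∧ PySem.Chars.slice s (some (k : Int)) (some ((k : Int) + 10)) = patMid then
      ' ' :: emitB s j (k + 10)
    else
      s.getD k ' ' :: emitB s j (k + 1)    -- x[k], in range since k < j ≤ len x
  else []
termination_by j - k
decreasing_by all_goals omega

-- the two-pointer loop
def loopB (s : List Char) (i j : Nat) : List Char :=
  if j - i = 8 ∧ PySem.Chars.slice s (some (i : Int)) (some (j : Int)) = patP then []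
  else if 9 ≤ j - i ∧ PySem.Chars.slice s (some (i : Int)) (some ((i : Int) + 9)) = patPfx then
    loopB s (i + 9) j
  else if 9 ≤ j - i ∧ PySem.Chars.slice s (some ((j : Int) - 9)) (some (j : Int)) = patSfx then
    loopB s i (j - 9)
  else emitB s j i
termination_by j - i
decreasing_by all_goals omega

def remove_pthread_alt (x : String) : String :=
  String.ofList (loopB x.toList 0 x.toList.length)

-- ===== PRECONDITION & SPEC =====
def Spec_remove_pthread (x : String) (out : String) : Prop := out = remove_pthread_alt x
instance (x : String) (out : String) : Decidable (Spec_remove_pthread x out) := by unfold Spec_remove_pthread; infer_instance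

-- ===== CLAIM (what is proved, stated in full; the proofs are below) =====
def Claim_equal_remove_pthread : Prop := ∀ (x : String), Dom_remove_pthread x → Spec_remove_pthread x (remove_pthread x)

-- ===== LEMMAS AND PROOFS =====

-- clean recursion computing the single non-overlapping replace of " -pthread " by " "
def replC (l : List Char) : List Char :=
  if patMid.isPrefixOf l then ' ' :: replC (l.drop 10)
  else match l with
  | [] => []
  | c :: t => c :: replC t
termination_by l.length
decreasing_by
  · rename_i h
    have hne : l ≠ [] := by intro h0; rw [h0] at h; simp [patMid] at h
    have : 0 < l.length := List.length_pos_iff.mpr hne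
    simp [List.length_drop]; omega
  · simp

theorem replC_pos (l : List Char) (h : patMid.isPrefixOf l) :
    replC l = ' ' :: replC (l.drop 10) := by rw [replC.eq_def, if_pos h]

theorem replC_neg (c : Char) (t : List Char) (h : ¬ patMid.isPrefixOf (c :: t)) :
    replC (c :: t) = c :: replC t := by rw [replC.eq_def, if_neg h]

theorem go_eq (fuel : Nat) (l acc : List Char) (h : l.length ≤ fuel) :
    PySem.Chars.replace.go patMid [' '] fuel l acc = acc.reverse ++ replC l := by
  induction fuel generalizing l acc with
  | zero =>
    have : l = [] := by cases l <;> simp_all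
    subst this
    simp [PySem.Chars.replace.go, replC, patMid]
  | succ n ih =>
    cases l with
    | nil => simp [PySem.Chars.replace.go, replC, patMid]
    | cons c t =>
      rw [PySem.Chars.replace.go]
      by_cases hp : patMid.isPrefixOf (c :: t)
      · rw [if_pos hp, ih _ _ (by simp [patMid] at h ⊢; omega)]
        conv_rhs => rw [replC_pos _ hp]
        simp [patMid]
      · rw [if_neg hp, ih _ _ (by simp at h ⊢; omega)]
        conv_rhs => rw [replC_neg _ _ hp]
        simp

theorem replace_eq (l : List Char) :
    PySem.Chars.replace l patMid [' '] = replC l := by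
  rw [PySem.Chars.replace, if_neg (by simp [patMid]), go_eq l.length l [] le_rfl]
  simp

-- the window x[i:j) as drop/take
theorem seg_length (s : List Char) (i j : Nat) (hj : j ≤ s.length) :
    ((s.drop i).take (j - i)).length = j - i := by simp; omega

theorem prefix_seg_iff (s p : List Char) (i j : Nat) (hij : i ≤ j) (_hj : j ≤ s.length) :
    p <+: (s.drop i).take (j - i) ↔ (i + p.length ≤ j ∧ (s.drop i).take p.length = p) := by
  rw [List.prefix_iff_eq_take]
  constructor
  · intro h
    have hl : p.length ≤ j - i := by
      have := congrArg List.length h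
      simp at this; omega
    refine ⟨by omega, ?_⟩
    conv_rhs => rw [h]
    rw [List.take_take]
    congr 1; omega
  · rintro ⟨h1, h2⟩
    rw [List.take_take, show min p.length (j - i) = p.length by omega, h2]

theorem suffix_seg_iff (s p : List Char) (i j : Nat) (hij : i ≤ j) (hj : j ≤ s.length) :
    p <:+ (s.drop i).take (j - i) ↔
      (i + p.length ≤ j ∧ (s.drop (j - p.length)).take p.length = p) := by
  have hseg : ∀ m, m ≤ j - i →
      ((s.drop i).take (j - i)).drop ((j - i) - m) = (s.drop (j - m)).take m := by
    intro m hm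
    rw [List.drop_take, List.drop_drop]
    congr 1
    · omega
    · congr 1
      omega
  rw [List.suffix_iff_eq_drop, seg_length s i j hj]
  constructor
  · intro h
    have hl : p.length ≤ j - i := by
      have := congrArg List.length h
      rw [List.length_drop, seg_length s i j hj] at this; omega
    refine ⟨by omega, ?_⟩
    conv_rhs => rw [h]
    rw [hseg p.length hl]
  · rintro ⟨h1, h2⟩
    rw [hseg p.length (by omega), h2]

theorem seg_drop (s : List Char) (i j m : Nat) :
    ((s.drop i).take (j - i)).drop m = (s.drop (i + m)).take (j - (i + m)) := by
  rw [List.drop_take, List.drop_drop]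
  congr 1
  omega

theorem seg_cons (s : List Char) (k j : Nat) (hk : k < j) (hj : j ≤ s.length) :
    (s.drop k).take (j - k) = s.getD k ' ' :: (s.drop (k + 1)).take (j - (k + 1)) := by
  have hks : k < s.length := by omega
  rw [List.drop_eq_getElem_cons hks, List.getD_eq_getElem s ' ' hks,
      show j - k = (j - (k + 1)) + 1 by omega, List.take_succ_cons]

theorem cast_ten : ((10 : Int)) = ((10 : Nat) : Int) := rfl
theorem cast_nine : ((9 : Int)) = ((9 : Nat) : Int) := rfl

theorem emit_eq (s : List Char) (j k : Nat) (hk : k ≤ j) (hj : j ≤ s.length) :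
    replC ((s.drop k).take (j - k)) = emitB s j k := by
  rw [emitB.eq_def]
  by_cases h : k < j
  · rw [if_pos h]
    have hsl : PySem.Chars.slice s (some (k : Int)) (some ((k : Int) + 10)) =
        (s.drop k).take 10 := by
      rw [PySem.Chars.slice_eq_listSlice, cast_ten, PySem.List.slice_natCast_add]
    have hc : patMid.isPrefixOf ((s.drop k).take (j - k)) = true ↔
        (k + 10 ≤ j ∧ PySem.Chars.slice s (some (k : Int)) (some ((k : Int) + 10)) = patMid) := by
      rw [List.isPrefixOf_iff_prefix, prefix_seg_iff s patMid k j (by omega) hj, hsl]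
      simp [patMid]
    by_cases hp : patMid.isPrefixOf ((s.drop k).take (j - k))
    · rw [if_pos (hc.mp hp), replC_pos _ hp, seg_drop,
          emit_eq s j (k + 10) (by have := hc.mp hp; omega) hj]
    · rw [if_neg (fun hb => hp (hc.mpr hb))]
      conv_lhs => rw [seg_cons s k j h hj]
      rw [replC_neg _ _ (by rw [← seg_cons s k j h hj]; exact hp),
          emit_eq s j (k + 1) (by omega) hj]
  · rw [if_neg h, show j - k = 0 by omega]
    simp [replC, patMid]
termination_by j - k

theorem main_loop (s : List Char) (i j : Nat) (hij : i ≤ j) (hj : j ≤ s.length) :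
    removeA ((s.drop i).take (j - i)) = loopB s i j := by
  rw [removeA.eq_def, loopB.eq_def]
  have hseg : PySem.Chars.slice s (some (i : Int)) (some (j : Int)) =
      (s.drop i).take (j - i) := by
    rw [PySem.Chars.slice_eq_listSlice, PySem.List.slice_natCast]
  -- condition 1
  have hc1 : (s.drop i).take (j - i) = patP ↔
      (j - i = 8 ∧ PySem.Chars.slice s (some (i : Int)) (some (j : Int)) = patP) := by
    rw [hseg]
    constructor
    · intro h
      refine ⟨?_, h⟩
      have := congrArg List.length h
      rw [seg_length s i j hj] at this
      simpa [patP] using this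
    · exact fun h => h.2
  -- condition 2
  have hpfx : PySem.Chars.slice s (some (i : Int)) (some ((i : Int) + 9)) =
      (s.drop i).take 9 := by
    rw [PySem.Chars.slice_eq_listSlice, cast_nine, PySem.List.slice_natCast_add]
  have hc2 : PySem.Chars.startswith ((s.drop i).take (j - i)) patPfx = true ↔
      (9 ≤ j - i ∧ PySem.Chars.slice s (some (i : Int)) (some ((i : Int) + 9)) = patPfx) := by
    rw [PySem.Chars.startswith, List.isPrefixOf_iff_prefix,
        prefix_seg_iff s patPfx i j hij hj, hpfx]
    simp [patPfx]
    omega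
  -- condition 3
  have hc3 : PySem.Chars.endswith ((s.drop i).take (j - i)) patSfx = true ↔
      (9 ≤ j - i ∧ PySem.Chars.slice s (some ((j : Int) - 9)) (some (j : Int)) = patSfx) := by
    rw [PySem.Chars.endswith, List.isSuffixOf_iff_suffix,
        suffix_seg_iff s patSfx i j hij hj]
    constructor
    · rintro ⟨h1, h2⟩
      have h9j : 9 ≤ j := by simp [patSfx] at h1; omega
      refine ⟨by simp [patSfx] at h1 ⊢; omega, ?_⟩
      rw [PySem.Chars.slice_eq_listSlice,
          show ((j : Int) - 9) = (((j - 9 : Nat)) : Int) by omega,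
          PySem.List.slice_natCast, show j - (j - 9) = 9 by omega]
      simpa [patSfx] using h2
    · rintro ⟨h1, h2⟩
      have h9j : 9 ≤ j := by omega
      rw [PySem.Chars.slice_eq_listSlice,
          show ((j : Int) - 9) = (((j - 9 : Nat)) : Int) by omega,
          PySem.List.slice_natCast, show j - (j - 9) = 9 by omega] at h2
      refine ⟨by simp [patSfx]; omega, by simpa [patSfx] using h2⟩
  by_cases h1 : (s.drop i).take (j - i) = patP
  · rw [if_pos h1, if_pos (hc1.mp h1)]
  · rw [if_neg h1, if_neg (fun hb => h1 (hc1.mpr hb))]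
    by_cases h2 : PySem.Chars.startswith ((s.drop i).take (j - i)) patPfx
    · rw [if_pos h2, if_pos (hc2.mp h2)]
      have harg : PySem.Chars.slice ((s.drop i).take (j - i)) (some 9) none =
          (s.drop (i + 9)).take (j - (i + 9)) := by
        rw [PySem.Chars.slice_eq_listSlice, cast_nine, PySem.List.slice_from_natCast, seg_drop]
      rw [harg, main_loop s (i + 9) j (by have := hc2.mp h2; omega) hj]
    · rw [if_neg h2, if_neg (fun hb => h2 (hc2.mpr hb))]
      by_cases h3 : PySem.Chars.endswith ((s.drop i).take (j - i)) patSfx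
      · rw [if_pos h3, if_pos (hc3.mp h3)]
        have h9 : 9 ≤ j - i := (hc3.mp h3).1
        have harg : PySem.Chars.slice ((s.drop i).take (j - i)) none (some (-9)) =
            (s.drop i).take ((j - 9) - i) := by
          rw [PySem.Chars.slice_eq_listSlice,
              PySem.List.slice_to_neg_ofNat _ 9 (by omega),
              seg_length s i j hj, List.take_take]
          congr 1; omega
        rw [harg, main_loop s i (j - 9) (by omega) (by omega)]
      · rw [if_neg h3, if_neg (fun hb => h3 (hc3.mpr hb))]
        rw [replace_eq, emit_eq s j i hij hj]
termination_by j - i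
decreasing_by
  · have := (hc2.mp h2).1; omega
  · omega

-- ===== VERDICT (by name: the statement is the Claim_ definition above) =====
theorem remove_pthread_spec : Claim_equal_remove_pthread := by
  intro x _
  unfold Spec_remove_pthread remove_pthread remove_pthread_alt
  rw [← main_loop x.toList 0 x.toList.length (by omega) (by omega),
      List.drop_zero, Nat.sub_zero, List.take_length]
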